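-- pv_equiv track=rewrite | github.com/haemin4738/algorithm | 알고리즘 및 실습/실습과제03/실습과제03_2.py | count_substr2
-- ===== SOURCE A (Python) =====
-- def count_substr2(s, start_char, end_char):
--     count = 0  # 부분 문자열의 개수를 저장할 변수
--     start_count = 0  # 현재까지 발견한 A로 시작하는 부분 문자열의 개수를 저장할 변수
--
--     for i in range(len(s)):  # 문자열을 처음부터 끝까지 순회
--         if s[i] == start_char:  # 만약 A로 시작하는 문자열을 발견하면
--             start_count += 1  # A로 시작하는 부분 문자열의 개수를 증가
--         elif s[i] == end_char:  # 만약 B로 끝나는 문자열을 발견하면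
--             count += start_count  # 현재까지 발견한 A로 시작하는 부분 문자열의 개수를 A로 시작하고 B로 끝나는 부분 문자열의 개수에 누적시킴
--
--     return count  # 부분 문자열의 개수를 반환
-- ===== SOURCE B (Python) =====
-- def count_substr2(s, start_char, end_char):
--     # pass 1: prefix table; pref[i] = occurrences of start_char in s[:i]
--     pref = []
--     c = 0
--     for ch in s:
--         pref.append(c)
--         if ch == start_char:
--             c += 1
--     # pass 2: aggregate over end positions (excluding positions equal to start_char)
--     total = 0
--     for i in range(len(s)):
--         if s[i] == end_char and s[i] != start_char:
--             total += pref[i]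
--     return total
-- ===== Notes on version B (the rewrite author's own statement) =====
-- stated objective: alternative
-- what changed: Replaces A's single interleaved running-counter loop with two passes: first materialise a prefix-count table of start_char occurrences, then sum the table entries at end_char positions.
import Mathlib
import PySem

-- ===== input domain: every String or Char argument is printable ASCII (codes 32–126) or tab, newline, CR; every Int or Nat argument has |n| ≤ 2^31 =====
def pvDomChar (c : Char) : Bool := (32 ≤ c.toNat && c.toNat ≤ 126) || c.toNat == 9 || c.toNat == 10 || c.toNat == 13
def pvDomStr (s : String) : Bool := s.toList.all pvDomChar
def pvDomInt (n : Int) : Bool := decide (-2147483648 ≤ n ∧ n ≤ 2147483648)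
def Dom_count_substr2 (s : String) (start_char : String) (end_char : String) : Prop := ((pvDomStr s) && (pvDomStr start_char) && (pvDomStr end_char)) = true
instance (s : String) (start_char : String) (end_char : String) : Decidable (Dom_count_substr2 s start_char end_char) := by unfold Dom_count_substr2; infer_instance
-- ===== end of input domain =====

-- B replaces A's interleaved running-counter loop by two passes (materialised prefix-count table, then a filtered summation); objective: alternative decomposition, same cost.

-- ===== PORT A =====
-- one pass, state (count, start_count); s[i] is the one-character string String.ofList [ch]
def count_substr2 (s : String) (start_char : String) (end_char : String) : Int :=
  (s.toList.foldl (fun (st : Int × Int) ch =>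
      if String.ofList [ch] = start_char then (st.1, st.2 + 1)
      else if String.ofList [ch] = end_char then (st.1 + st.2, st.2)
      else st) (0, 0)).1

-- ===== PORT B =====
-- pass 1 builds the prefix table pref (pref[i] = #start_char in s[:i]); pass 2 sums pref[i]
-- at end_char positions (Source B's index loop is rendered as the fold over pref zipped with s)
def count_substr2_alt (s : String) (start_char : String) (end_char : String) : Int :=
  let pref : List Int := (s.toList.foldl (fun (acc : List Int × Int) ch =>
      (acc.1 ++ [acc.2], if String.ofList [ch] = start_char then acc.2 + 1 else acc.2)) ([], 0)).1
  (pref.zip s.toList).foldl (fun (t : Int) pc =>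
      if String.ofList [pc.2] = end_char ∧ String.ofList [pc.2] ≠ start_char then t + pc.1 else t) 0

-- ===== PRECONDITION & SPEC =====
def Spec_count_substr2 (s : String) (start_char : String) (end_char : String) (out : Int) : Prop := out = count_substr2_alt s start_char end_char
instance (s : String) (start_char : String) (end_char : String) (out : Int) : Decidable (Spec_count_substr2 s start_char end_char out) := by unfold Spec_count_substr2; infer_instance

-- ===== CLAIM (what is proved, stated in full; the proofs are below) =====
def Claim_equal_count_substr2 : Prop := ∀ (s : String) (start_char : String) (end_char : String), Dom_count_substr2 s start_char end_char → Spec_count_substr2 s start_char end_char (count_substr2 s start_char end_char)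

-- ===== LEMMAS AND PROOFS =====

-- mathematical prefix table: prefsOf a l c = the list c, c+[ch0=a], … produced by pass 1
def prefsOf (a : String) : List Char → Int → List Int
  | [], _ => []
  | ch :: t, c => c :: prefsOf a t (if String.ofList [ch] = a then c + 1 else c)

lemma build_pref (a : String) (l : List Char) (acc : List Int) (c : Int) :
    (l.foldl (fun (st : List Int × Int) ch =>
        (st.1 ++ [st.2], if String.ofList [ch] = a then st.2 + 1 else st.2)) (acc, c)).1
      = acc ++ prefsOf a l c := by
  induction l generalizing acc c with
  | nil => simp [prefsOf]
  | cons ch t ih => simp [prefsOf, ih]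

lemma key (a b : String) (l : List Char) (k c t : Int) :
    (l.foldl (fun (st : Int × Int) ch =>
        if String.ofList [ch] = a then (st.1, st.2 + 1)
        else if String.ofList [ch] = b then (st.1 + st.2, st.2)
        else st) (k, c)).1 + t
      = k + ((prefsOf a l c).zip l).foldl (fun (t : Int) pc =>
          if String.ofList [pc.2] = b ∧ String.ofList [pc.2] ≠ a then t + pc.1 else t) t := by
  induction l generalizing k c t with
  | nil => simp
  | cons ch tl ih =>
    by_cases ha : String.ofList [ch] = a
    · have hnb : ¬ (String.ofList [ch] = b ∧ String.ofList [ch] ≠ a) := fun h => h.2 ha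
      simp only [prefsOf, List.foldl_cons, List.zip_cons_cons, if_pos ha, if_neg hnb]
      exact ih k (c + 1) t
    · by_cases hb : String.ofList [ch] = b
      · simp only [prefsOf, List.foldl_cons, List.zip_cons_cons, if_neg ha, if_pos hb]
        rw [if_pos ⟨hb, ha⟩]
        have := ih (k + c) c (t + c)
        omega
      · simp only [prefsOf, List.foldl_cons, List.zip_cons_cons, if_neg ha, if_neg hb]
        rw [if_neg (by simp [hb])]
        exact ih k c t

-- ===== VERDICT (by name: the statement is the Claim_ definition above) =====
theorem count_substr2_spec : Claim_equal_count_substr2 := by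
  intro s a b _
  unfold Spec_count_substr2 count_substr2 count_substr2_alt
  rw [build_pref a s.toList [] 0]
  have h := key a b s.toList 0 0 0
  simpa using h
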